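-- pv_equiv track=rewrite | github.com/sumenko/contest_14 | contest_14G_garderob.py | sorted_gard
-- ===== SOURCE A (Python) =====
-- def sorted_gard(arr, n=None):
--     counter = {}
--     arr = arr.split()
--     if n:
--         arr = arr[:n]
--     for item in arr:
--         try:
--             counter[item] += 1
--         except KeyError:
--             counter[item] = 1
--     return [' '.join(k * counter[k]) for k in sorted(counter.keys())]
-- ===== SOURCE B (Python) =====
-- def sorted_gard(arr, n=None):
--     toks = arr.split()
--     if n:
--         toks = toks[:n]
--     toks.sort()
--     out = []
--     i = 0
--     while i < len(toks):
--         j = i + 1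
--         while j < len(toks) and toks[j] == toks[i]:
--             j += 1
--         out.append(' '.join(toks[i] * (j - i)))
--         i = j
--     return out
-- ===== Notes on version B (the rewrite author's own statement) =====
-- stated objective: alternative
-- what changed: B replaces A's exception-driven dict counting followed by a sort of the distinct keys with a single sort of the whole token list and one run-length scan over consecutive equal tokens (sort+groupby), emitting each run's space-joined repetition directly.
import Mathlib
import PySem

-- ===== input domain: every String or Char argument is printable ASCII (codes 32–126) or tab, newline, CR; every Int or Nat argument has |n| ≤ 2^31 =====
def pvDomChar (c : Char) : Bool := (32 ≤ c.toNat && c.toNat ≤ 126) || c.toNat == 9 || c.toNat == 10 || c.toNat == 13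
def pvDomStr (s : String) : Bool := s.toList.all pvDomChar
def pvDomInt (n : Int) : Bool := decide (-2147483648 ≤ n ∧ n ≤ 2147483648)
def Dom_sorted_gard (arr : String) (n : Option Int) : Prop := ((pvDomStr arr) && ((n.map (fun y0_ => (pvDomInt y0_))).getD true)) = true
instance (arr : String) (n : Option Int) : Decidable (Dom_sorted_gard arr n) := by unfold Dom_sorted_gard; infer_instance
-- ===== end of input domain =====

-- B replaces A's exception-driven dict counting + key sort by sorting the full
-- token list once and emitting run-lengths in a single scan (objective: alternative).

-- ===== PORT A =====
def sorted_gard (arr : String) (n : Option Int) : List String :=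
  let toks0 := PySem.Str.split₀ arr
  let toks := match n with
    | none => toks0
    | some m => if m = 0 then toks0 else PySem.List.slice toks0 none (some m)
  let counter : PySem.Dict String Int := toks.foldl (fun d item =>
      match d.get? item with
      | some v => d.insert item (v + 1)
      | none => d.insert item 1) PySem.Dict.empty
  (PySem.List.sorted counter.keys (fun k => k)).map
    (fun k => PySem.Str.join " "
      ((PySem.List.pyRepeat k.toList (counter.getD k 0)).map (fun c => String.ofList [c])))

-- ===== PORT B =====
-- inner while loop scanning the run of tokens equal to toks[i]: takeWhile/dropWhile
def sgRuns : List String → List String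
  | [] => []
  | x :: rest =>
      PySem.Str.join " "
        ((PySem.List.pyRepeat x.toList (1 + ((rest.takeWhile (fun y => y == x)).length : Int))).map
          (fun c => String.ofList [c]))
      :: sgRuns (rest.dropWhile (fun y => y == x))
  termination_by l => l.length
  decreasing_by
    simp only [List.length_cons]
    exact Nat.lt_succ_of_le (List.length_dropWhile_le _ rest)

def sorted_gard_alt (arr : String) (n : Option Int) : List String :=
  let toks0 := PySem.Str.split₀ arr
  let toks := match n with
    | none => toks0
    | some m => if m = 0 then toks0 else PySem.List.slice toks0 none (some m)
  sgRuns (PySem.List.sorted toks (fun k => k))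

-- ===== PRECONDITION & SPEC =====
def Spec_sorted_gard (arr : String) (n : Option Int) (out : List String) : Prop := out = sorted_gard_alt arr n
instance (arr : String) (n : Option Int) (out : List String) : Decidable (Spec_sorted_gard arr n out) := by unfold Spec_sorted_gard; infer_instance

-- ===== CLAIM (what is proved, stated in full; the proofs are below) =====
def Claim_equal_sorted_gard : Prop := ∀ (arr : String) (n : Option Int), Dom_sorted_gard arr n → Spec_sorted_gard arr n (sorted_gard arr n)

-- ===== LEMMAS AND PROOFS =====

-- the per-key output string: ' '.join(k * c)
def sgEmit (k : String) (c : Int) : String :=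
  PySem.Str.join " " ((PySem.List.pyRepeat k.toList c).map (fun c => String.ofList [c]))

-- A's try/except counting step is Dict.modify's step
lemma sg_counter_eq (l : List String) :
    l.foldl (fun d item =>
      match d.get? item with
      | some v => d.insert item (v + 1)
      | none => d.insert item 1) (PySem.Dict.empty : PySem.Dict String Int) = PySem.Dict.counter l := by
  rw [PySem.Dict.counter_eq_foldl]
  apply PySem.List.foldl_congr_mem
  intro d x _
  show (match d.get? x with
      | some v => d.insert x (v + 1)
      | none => d.insert x 1) = d.modify x 0 (· + 1)
  unfold PySem.Dict.modify PySem.Dict.getD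
  cases d.get? x <;> simp

-- accumulator lemma for Set.ofList
lemma sg_foldl_add_consAcc {x : String} (d : List String) (s : List String) (hx : x ∉ d) :
    List.foldl PySem.Set.add (x :: s) d = x :: List.foldl PySem.Set.add s d := by
  induction d generalizing s with
  | nil => rfl
  | cons y t ih =>
    have hxy : (y == x) = false := by
      simp only [beq_eq_false_iff_ne]
      intro h; exact hx (h ▸ List.mem_cons_self)
    have hstep : PySem.Set.add (x :: s) y = x :: PySem.Set.add s y := by
      unfold PySem.Set.add PySem.Set.contains
      simp only [List.contains_cons, hxy, Bool.false_or]
      by_cases h : y ∈ s <;> simp [h]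
    simp only [List.foldl_cons, hstep]
    exact ih _ (fun h => hx (List.mem_cons_of_mem _ h))

-- dedup is a sublist
lemma sg_foldl_add_sublist (l : List String) : ∀ s : List String,
    ∃ t, List.foldl PySem.Set.add s l = s ++ t ∧ t.Sublist l := by
  induction l with
  | nil => exact fun s => ⟨[], by simp⟩
  | cons y l' ih =>
    intro s
    by_cases h : PySem.Set.contains s y = true
    · obtain ⟨t, ht, hs⟩ := ih s
      refine ⟨t, ?_, hs.cons y⟩
      simp only [List.foldl_cons, PySem.Set.add]
      rw [if_pos h]
      exact ht
    · obtain ⟨t, ht, hs⟩ := ih (s ++ [y])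
      refine ⟨y :: t, ?_, hs.cons₂ y⟩
      simp only [List.foldl_cons, PySem.Set.add]
      rw [if_neg h, ht]
      simp

lemma sg_ofList_sublist (l : List String) : (PySem.Set.ofList l).Sublist l := by
  obtain ⟨t, ht, hs⟩ := sg_foldl_add_sublist l []
  show (List.foldl PySem.Set.add [] l).Sublist l
  rw [ht]
  simpa using hs

-- in a sorted list headed by x, x does not survive dropWhile (== x)
-- a run of copies of x no-ops Set.add
lemma sg_foldl_add_replicate (x : String) (c : Nat) :
    List.foldl PySem.Set.add [x] (List.replicate c x) = [x] := by
  induction c with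
  | zero => rfl
  | succ c ih =>
    rw [List.replicate_succ, List.foldl_cons]
    have : PySem.Set.add [x] x = [x] := by
      unfold PySem.Set.add; simp [PySem.Set.contains]
    rw [this, ih]

lemma sg_not_mem_dropWhile {x : String} {rest : List String}
    (h : List.Pairwise (· ≤ ·) (x :: rest)) :
    x ∉ rest.dropWhile (fun y => y == x) := by
  induction rest with
  | nil => simp
  | cons y r ih =>
    by_cases hyx : (y == x) = true
    · rw [List.dropWhile_cons, if_pos hyx]
      exact ih (h.sublist ((List.sublist_cons_self y r).cons₂ x))
    · rw [List.dropWhile_cons, if_neg hyx]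
      intro hx
      rcases List.mem_cons.mp hx with h1 | h2
      · exact hyx (by simp [h1])
      · have hxy : x ≤ y := (List.pairwise_cons.mp h).1 y List.mem_cons_self
        have hyx' : y ≤ x :=
          (List.pairwise_cons.mp (List.pairwise_cons.mp h).2).1 x h2
        exact hyx (by simp [le_antisymm hyx' hxy])

-- main run lemma on a sorted list
lemma sg_runs_eq (m : List String) (h : List.Pairwise (· ≤ ·) m) :
    sgRuns m = (PySem.List.dedup m).map (fun k => sgEmit k (m.count k)) := by
  induction m using sgRuns.induct with
  | case1 => rw [sgRuns]; rfl
  | case2 x rest ih =>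
    set t := rest.takeWhile (fun y => y == x) with hT
    set d := rest.dropWhile (fun y => y == x) with hD
    have hsplit : rest = t ++ d := (List.takeWhile_append_dropWhile).symm
    have ht_all : ∀ y ∈ t, y = x := fun y hy => by
      simpa using List.mem_takeWhile_imp hy
    have ht_rep : t = List.replicate t.length x := List.eq_replicate_of_mem ht_all
    have hx_not : x ∉ d := sg_not_mem_dropWhile h
    have hPd : List.Pairwise (· ≤ ·) d := by
      refine h.sublist ?_
      exact (List.dropWhile_sublist _).trans (List.sublist_cons_self x rest)
    have hdedup : PySem.List.dedup (x :: rest) = x :: PySem.List.dedup d := by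
      show PySem.Set.ofList (x :: rest) = x :: PySem.Set.ofList d
      unfold PySem.Set.ofList
      rw [List.foldl_cons]
      have h0 : PySem.Set.add PySem.Set.empty x = [x] := rfl
      rw [h0, hsplit, List.foldl_append, ht_rep, sg_foldl_add_replicate,
        sg_foldl_add_consAcc d [] hx_not]
      rfl
    have hcx : (x :: rest).count x = 1 + t.length := by
      rw [hsplit, List.count_cons, List.count_append, ht_rep]
      simp [List.count_eq_zero.mpr hx_not]
      omega
    have hck : ∀ k ∈ PySem.List.dedup d, (x :: rest).count k = d.count k := by
      intro k hk
      have hkd : k ∈ d := (PySem.Set.mem_ofList d k).mp hk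
      have hkx : k ≠ x := fun e => hx_not (e ▸ hkd)
      rw [hsplit, List.count_cons, List.count_append, ht_rep,
        List.count_replicate, if_neg (by simp [Ne.symm hkx] : ¬ (x == k) = true)]
      simp [Ne.symm hkx]
    rw [sgRuns, ih hPd, hdedup, List.map_cons]
    congr 1
    · show sgEmit x (1 + (t.length : Int)) = sgEmit x ((x :: rest).count x : Int)
      rw [hcx]; congr 1
    · apply List.map_congr_left
      intro k hk
      rw [hck k hk]

-- dedup commutes with sorting
lemma sg_dedup_sorted (l : List String) :
    PySem.List.dedup (PySem.List.sorted l (fun k => k)) =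
      PySem.List.sorted (PySem.Set.ofList l) (fun k => k) := by
  rw [PySem.List.dedup_eq_ofList]
  have hperm1 := PySem.List.sorted_perm l (fun k => k) false
  have hperm2 := PySem.List.sorted_perm (PySem.Set.ofList l) (fun k => k) false
  apply PySem.List.eq_of_perm_of_pairwise_le_of_injective (fun k => k)
    (fun a b h => h)
  · rw [List.perm_ext_iff_of_nodup (PySem.Set.nodup_ofList _)
      (hperm2.nodup_iff.mpr (PySem.Set.nodup_ofList _))]
    intro a
    rw [PySem.Set.mem_ofList, hperm1.mem_iff, hperm2.mem_iff, PySem.Set.mem_ofList]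
  · exact (PySem.List.sorted_pairwise l (fun k => k)).sublist
      (sg_ofList_sublist _)
  · exact PySem.List.sorted_pairwise _ _

-- the core equality, for any token list
lemma sg_main (l : List String) :
    (PySem.List.sorted
        (l.foldl (fun d item =>
          match d.get? item with
          | some v => d.insert item (v + 1)
          | none => d.insert item 1) (PySem.Dict.empty : PySem.Dict String Int)).keys (fun k => k)).map
      (fun k => PySem.Str.join " "
        ((PySem.List.pyRepeat k.toList
          ((l.foldl (fun d item =>
            match d.get? item with
            | some v => d.insert item (v + 1)
            | none => d.insert item 1) (PySem.Dict.empty : PySem.Dict String Int)).getD k 0)).map (fun c => String.ofList [c])))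
    = sgRuns (PySem.List.sorted l (fun k => k)) := by
  rw [sg_counter_eq, PySem.Dict.keys_counter,
    sg_runs_eq _ (PySem.List.sorted_pairwise l (fun k => k)), sg_dedup_sorted]
  apply List.map_congr_left
  intro k hk
  show _ = sgEmit k _
  unfold sgEmit
  rw [PySem.Dict.getD_counter,
    (PySem.List.sorted_perm l (fun k => k) false).count_eq]

-- ===== VERDICT (by name: the statement is the Claim_ definition above) =====
theorem sorted_gard_spec : Claim_equal_sorted_gard := by
  intro arr n _
  show sorted_gard arr n = sorted_gard_alt arr n
  unfold sorted_gard sorted_gard_alt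
  dsimp only
  exact sg_main _
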